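-- pv_equiv track=rewrite | github.com/peragwin/woofnb | src/woofnb/serialize.py | _iter_tokens_canonical
-- ===== SOURCE A (Python) =====
-- from collections import OrderedDict
-- from typing import Iterable
--
-- _CANON_KEY_ORDER = [
--     "id",
--     "type",
--     "name",
--     "deps",
--     "timeout",
--     "memory_mb",
--     "sidefx",
--     "tags",
--     "retries",
--     "priority",
--     "disabled",
--     "lang",
-- ]
--
-- def _iter_tokens_canonical(tokens: OrderedDict[str, str]) -> Iterable[tuple[str, str]]:
--     seen = set()
--     for k in _CANON_KEY_ORDER:
--         if k in tokens:
--             yield k, tokens[k]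
--             seen.add(k)
--     # any remaining keys in original order
--     for k, v in tokens.items():
--         if k not in seen:
--             yield k, v
-- ===== SOURCE B (Python) =====
-- _CANON_KEY_ORDER = [
--     "id",
--     "type",
--     "name",
--     "deps",
--     "timeout",
--     "memory_mb",
--     "sidefx",
--     "tags",
--     "retries",
--     "priority",
--     "disabled",
--     "lang",
-- ]
--
-- _INDEX = {k: i for i, k in enumerate(_CANON_KEY_ORDER)}
-- _N = len(_CANON_KEY_ORDER)
--
-- def _iter_tokens_canonical(tokens):
--     # one stable sort by canonical rank; non-canonical keys share rank _N,
--     # so stability keeps them in original insertion order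
--     return sorted(tokens.items(), key=lambda kv: _INDEX.get(kv[0], _N))
-- ===== Notes on version B (the rewrite author's own statement) =====
-- stated objective: simpler
-- what changed: Replaces A's two passes (a scan over the canonical key list plus a 'seen' set filtering a second scan over the dict) with a single stable sort of the items by canonical rank, non-canonical keys sharing the max rank so stability preserves their insertion order; Pre_ only states the dict representation invariant (pairwise-distinct keys), which every Python dict argument satisfies.
import Mathlib
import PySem

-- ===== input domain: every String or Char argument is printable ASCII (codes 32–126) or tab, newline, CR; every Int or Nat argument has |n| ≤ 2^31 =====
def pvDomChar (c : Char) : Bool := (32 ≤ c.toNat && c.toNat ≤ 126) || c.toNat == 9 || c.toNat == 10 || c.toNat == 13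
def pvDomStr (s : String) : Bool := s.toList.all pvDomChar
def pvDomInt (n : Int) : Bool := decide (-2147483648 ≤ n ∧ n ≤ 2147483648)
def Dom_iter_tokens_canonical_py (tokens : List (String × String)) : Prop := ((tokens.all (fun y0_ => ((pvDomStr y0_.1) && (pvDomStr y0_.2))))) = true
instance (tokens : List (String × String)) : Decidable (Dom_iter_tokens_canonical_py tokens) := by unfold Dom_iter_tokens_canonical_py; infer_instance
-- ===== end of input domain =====

-- B replaces A's two passes (canonical-key scan + 'seen'-set filtered scan of the dict) by one
-- stable sort of the items by canonical rank (objective: simpler).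

-- module constant _CANON_KEY_ORDER
def pvCanonKeyOrder : List String :=
  ["id", "type", "name", "deps", "timeout", "memory_mb", "sidefx", "tags",
   "retries", "priority", "disabled", "lang"]

-- ===== PORT A =====
-- first loop: 'for k in _CANON_KEY_ORDER: if k in tokens: yield k, tokens[k]; seen.add(k)'
def pvCanonPass (d : PySem.Dict String String)
    (acc : List (String × String) × PySem.Set String) (ks : List String) :
    List (String × String) × PySem.Set String :=
  ks.foldl (fun acc k =>
    match PySem.Dict.get? d k with
    | some v => (acc.1 ++ [(k, v)], PySem.Set.add acc.2 k)
    | none => acc) acc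

def iter_tokens_canonical_py (tokens : List (String × String)) : List (String × String) :=
  let first := pvCanonPass ⟨tokens⟩ ([], PySem.Set.ofList []) pvCanonKeyOrder
  -- second loop: 'for k, v in tokens.items(): if k not in seen: yield k, v'
  first.1 ++ tokens.foldl (fun acc kv => if !first.2.contains kv.1 then acc ++ [kv] else acc) []

-- ===== PORT B =====
-- _INDEX = {k: i for i, k in enumerate(_CANON_KEY_ORDER)}
def pvIndex : PySem.Dict String Int :=
  (PySem.List.enumerate pvCanonKeyOrder 0).foldl
    (fun d p => PySem.Dict.insert d p.2 p.1) ⟨[]⟩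

-- sorted(tokens.items(), key=lambda kv: _INDEX.get(kv[0], _N))
def iter_tokens_canonical_py_alt (tokens : List (String × String)) : List (String × String) :=
  PySem.List.sorted tokens
    (fun kv => PySem.Dict.getD pvIndex kv.1 (pvCanonKeyOrder.length : Int)) false

-- ===== PRECONDITION & SPEC =====
-- Pre_ states the representation invariant of the Python dict argument (pairwise-distinct
-- keys); it excludes no constructible Python input, since a dict cannot hold duplicate keys.
def Pre_iter_tokens_canonical_py (tokens : List (String × String)) : Prop :=
  (tokens.map Prod.fst).Nodup
instance (tokens : List (String × String)) : Decidable (Pre_iter_tokens_canonical_py tokens) := by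
  unfold Pre_iter_tokens_canonical_py; infer_instance

def pvWitness_iter_tokens_canonical_py : (List (String × String)) :=
  [("name", "n1"), ("extra", "x"), ("id", "t1")]

def Spec_iter_tokens_canonical_py (tokens : List (String × String)) (out : List (String × String)) : Prop := out = iter_tokens_canonical_py_alt tokens
instance (tokens : List (String × String)) (out : List (String × String)) : Decidable (Spec_iter_tokens_canonical_py tokens out) := by unfold Spec_iter_tokens_canonical_py; infer_instance

-- ===== CLAIM (what is proved, stated in full; the proofs are below) =====
def Claim_equal_iter_tokens_canonical_py : Prop := ∀ (tokens : List (String × String)), Dom_iter_tokens_canonical_py tokens → Pre_iter_tokens_canonical_py tokens → Spec_iter_tokens_canonical_py tokens (iter_tokens_canonical_py tokens)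

-- ===== LEMMAS AND PROOFS =====

-- the rank function B sorts by
def pvRk (k : String) : Int := PySem.Dict.getD pvIndex k (pvCanonKeyOrder.length : Int)

lemma pvIndex_eq : pvIndex = ⟨[("id", 0), ("type", 1), ("name", 2), ("deps", 3), ("timeout", 4),
    ("memory_mb", 5), ("sidefx", 6), ("tags", 7), ("retries", 8), ("priority", 9),
    ("disabled", 10), ("lang", 11)]⟩ := by rfl

set_option maxHeartbeats 1000000 in
lemma pvRk_eq (k : String) :
    pvRk k = if k = "id" then 0 else if k = "type" then 1 else if k = "name" then 2
      else if k = "deps" then 3 else if k = "timeout" then 4 else if k = "memory_mb" then 5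
      else if k = "sidefx" then 6 else if k = "tags" then 7 else if k = "retries" then 8
      else if k = "priority" then 9 else if k = "disabled" then 10 else if k = "lang" then 11
      else 12 := by
  split_ifs with h1 h2 h3 h4 h5 h6 h7 h8 h9 h10 h11 h12 <;>
    first
      | (subst_vars; rfl)
      | (rw [pvRk, pvIndex_eq]
         simp only [PySem.Dict.getD, PySem.Dict.get?, List.find?,
           show ("id" == k) = false by simp [Ne.symm h1],
           show ("type" == k) = false by simp [Ne.symm h2],
           show ("name" == k) = false by simp [Ne.symm h3],
           show ("deps" == k) = false by simp [Ne.symm h4],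
           show ("timeout" == k) = false by simp [Ne.symm h5],
           show ("memory_mb" == k) = false by simp [Ne.symm h6],
           show ("sidefx" == k) = false by simp [Ne.symm h7],
           show ("tags" == k) = false by simp [Ne.symm h8],
           show ("retries" == k) = false by simp [Ne.symm h9],
           show ("priority" == k) = false by simp [Ne.symm h10],
           show ("disabled" == k) = false by simp [Ne.symm h11],
           show ("lang" == k) = false by simp [Ne.symm h12]]
         rfl)

lemma pvRk_iff_0 (k : String) : pvRk k = 0 ↔ k = "id" := by
  by_cases h1 : k = "id"
  · subst h1; decide
  by_cases h2 : k = "type"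
  · subst h2; decide
  by_cases h3 : k = "name"
  · subst h3; decide
  by_cases h4 : k = "deps"
  · subst h4; decide
  by_cases h5 : k = "timeout"
  · subst h5; decide
  by_cases h6 : k = "memory_mb"
  · subst h6; decide
  by_cases h7 : k = "sidefx"
  · subst h7; decide
  by_cases h8 : k = "tags"
  · subst h8; decide
  by_cases h9 : k = "retries"
  · subst h9; decide
  by_cases h10 : k = "priority"
  · subst h10; decide
  by_cases h11 : k = "disabled"
  · subst h11; decide
  by_cases h12 : k = "lang"
  · subst h12; decide
  simp [pvRk_eq, h1, h2, h3, h4, h5, h6, h7, h8, h9, h10, h11, h12]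

lemma pvRk_iff_1 (k : String) : pvRk k = 1 ↔ k = "type" := by
  by_cases h1 : k = "id"
  · subst h1; decide
  by_cases h2 : k = "type"
  · subst h2; decide
  by_cases h3 : k = "name"
  · subst h3; decide
  by_cases h4 : k = "deps"
  · subst h4; decide
  by_cases h5 : k = "timeout"
  · subst h5; decide
  by_cases h6 : k = "memory_mb"
  · subst h6; decide
  by_cases h7 : k = "sidefx"
  · subst h7; decide
  by_cases h8 : k = "tags"
  · subst h8; decide
  by_cases h9 : k = "retries"
  · subst h9; decide
  by_cases h10 : k = "priority"
  · subst h10; decide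
  by_cases h11 : k = "disabled"
  · subst h11; decide
  by_cases h12 : k = "lang"
  · subst h12; decide
  simp [pvRk_eq, h1, h2, h3, h4, h5, h6, h7, h8, h9, h10, h11, h12]

lemma pvRk_iff_2 (k : String) : pvRk k = 2 ↔ k = "name" := by
  by_cases h1 : k = "id"
  · subst h1; decide
  by_cases h2 : k = "type"
  · subst h2; decide
  by_cases h3 : k = "name"
  · subst h3; decide
  by_cases h4 : k = "deps"
  · subst h4; decide
  by_cases h5 : k = "timeout"
  · subst h5; decide
  by_cases h6 : k = "memory_mb"
  · subst h6; decide
  by_cases h7 : k = "sidefx"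
  · subst h7; decide
  by_cases h8 : k = "tags"
  · subst h8; decide
  by_cases h9 : k = "retries"
  · subst h9; decide
  by_cases h10 : k = "priority"
  · subst h10; decide
  by_cases h11 : k = "disabled"
  · subst h11; decide
  by_cases h12 : k = "lang"
  · subst h12; decide
  simp [pvRk_eq, h1, h2, h3, h4, h5, h6, h7, h8, h9, h10, h11, h12]

lemma pvRk_iff_3 (k : String) : pvRk k = 3 ↔ k = "deps" := by
  by_cases h1 : k = "id"
  · subst h1; decide
  by_cases h2 : k = "type"
  · subst h2; decide
  by_cases h3 : k = "name"
  · subst h3; decide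
  by_cases h4 : k = "deps"
  · subst h4; decide
  by_cases h5 : k = "timeout"
  · subst h5; decide
  by_cases h6 : k = "memory_mb"
  · subst h6; decide
  by_cases h7 : k = "sidefx"
  · subst h7; decide
  by_cases h8 : k = "tags"
  · subst h8; decide
  by_cases h9 : k = "retries"
  · subst h9; decide
  by_cases h10 : k = "priority"
  · subst h10; decide
  by_cases h11 : k = "disabled"
  · subst h11; decide
  by_cases h12 : k = "lang"
  · subst h12; decide
  simp [pvRk_eq, h1, h2, h3, h4, h5, h6, h7, h8, h9, h10, h11, h12]

lemma pvRk_iff_4 (k : String) : pvRk k = 4 ↔ k = "timeout" := by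
  by_cases h1 : k = "id"
  · subst h1; decide
  by_cases h2 : k = "type"
  · subst h2; decide
  by_cases h3 : k = "name"
  · subst h3; decide
  by_cases h4 : k = "deps"
  · subst h4; decide
  by_cases h5 : k = "timeout"
  · subst h5; decide
  by_cases h6 : k = "memory_mb"
  · subst h6; decide
  by_cases h7 : k = "sidefx"
  · subst h7; decide
  by_cases h8 : k = "tags"
  · subst h8; decide
  by_cases h9 : k = "retries"
  · subst h9; decide
  by_cases h10 : k = "priority"
  · subst h10; decide
  by_cases h11 : k = "disabled"
  · subst h11; decide
  by_cases h12 : k = "lang"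
  · subst h12; decide
  simp [pvRk_eq, h1, h2, h3, h4, h5, h6, h7, h8, h9, h10, h11, h12]

lemma pvRk_iff_5 (k : String) : pvRk k = 5 ↔ k = "memory_mb" := by
  by_cases h1 : k = "id"
  · subst h1; decide
  by_cases h2 : k = "type"
  · subst h2; decide
  by_cases h3 : k = "name"
  · subst h3; decide
  by_cases h4 : k = "deps"
  · subst h4; decide
  by_cases h5 : k = "timeout"
  · subst h5; decide
  by_cases h6 : k = "memory_mb"
  · subst h6; decide
  by_cases h7 : k = "sidefx"
  · subst h7; decide
  by_cases h8 : k = "tags"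
  · subst h8; decide
  by_cases h9 : k = "retries"
  · subst h9; decide
  by_cases h10 : k = "priority"
  · subst h10; decide
  by_cases h11 : k = "disabled"
  · subst h11; decide
  by_cases h12 : k = "lang"
  · subst h12; decide
  simp [pvRk_eq, h1, h2, h3, h4, h5, h6, h7, h8, h9, h10, h11, h12]

lemma pvRk_iff_6 (k : String) : pvRk k = 6 ↔ k = "sidefx" := by
  by_cases h1 : k = "id"
  · subst h1; decide
  by_cases h2 : k = "type"
  · subst h2; decide
  by_cases h3 : k = "name"
  · subst h3; decide
  by_cases h4 : k = "deps"
  · subst h4; decide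
  by_cases h5 : k = "timeout"
  · subst h5; decide
  by_cases h6 : k = "memory_mb"
  · subst h6; decide
  by_cases h7 : k = "sidefx"
  · subst h7; decide
  by_cases h8 : k = "tags"
  · subst h8; decide
  by_cases h9 : k = "retries"
  · subst h9; decide
  by_cases h10 : k = "priority"
  · subst h10; decide
  by_cases h11 : k = "disabled"
  · subst h11; decide
  by_cases h12 : k = "lang"
  · subst h12; decide
  simp [pvRk_eq, h1, h2, h3, h4, h5, h6, h7, h8, h9, h10, h11, h12]

lemma pvRk_iff_7 (k : String) : pvRk k = 7 ↔ k = "tags" := by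
  by_cases h1 : k = "id"
  · subst h1; decide
  by_cases h2 : k = "type"
  · subst h2; decide
  by_cases h3 : k = "name"
  · subst h3; decide
  by_cases h4 : k = "deps"
  · subst h4; decide
  by_cases h5 : k = "timeout"
  · subst h5; decide
  by_cases h6 : k = "memory_mb"
  · subst h6; decide
  by_cases h7 : k = "sidefx"
  · subst h7; decide
  by_cases h8 : k = "tags"
  · subst h8; decide
  by_cases h9 : k = "retries"
  · subst h9; decide
  by_cases h10 : k = "priority"
  · subst h10; decide
  by_cases h11 : k = "disabled"
  · subst h11; decide
  by_cases h12 : k = "lang"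
  · subst h12; decide
  simp [pvRk_eq, h1, h2, h3, h4, h5, h6, h7, h8, h9, h10, h11, h12]

lemma pvRk_iff_8 (k : String) : pvRk k = 8 ↔ k = "retries" := by
  by_cases h1 : k = "id"
  · subst h1; decide
  by_cases h2 : k = "type"
  · subst h2; decide
  by_cases h3 : k = "name"
  · subst h3; decide
  by_cases h4 : k = "deps"
  · subst h4; decide
  by_cases h5 : k = "timeout"
  · subst h5; decide
  by_cases h6 : k = "memory_mb"
  · subst h6; decide
  by_cases h7 : k = "sidefx"
  · subst h7; decide
  by_cases h8 : k = "tags"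
  · subst h8; decide
  by_cases h9 : k = "retries"
  · subst h9; decide
  by_cases h10 : k = "priority"
  · subst h10; decide
  by_cases h11 : k = "disabled"
  · subst h11; decide
  by_cases h12 : k = "lang"
  · subst h12; decide
  simp [pvRk_eq, h1, h2, h3, h4, h5, h6, h7, h8, h9, h10, h11, h12]

lemma pvRk_iff_9 (k : String) : pvRk k = 9 ↔ k = "priority" := by
  by_cases h1 : k = "id"
  · subst h1; decide
  by_cases h2 : k = "type"
  · subst h2; decide
  by_cases h3 : k = "name"
  · subst h3; decide
  by_cases h4 : k = "deps"
  · subst h4; decide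
  by_cases h5 : k = "timeout"
  · subst h5; decide
  by_cases h6 : k = "memory_mb"
  · subst h6; decide
  by_cases h7 : k = "sidefx"
  · subst h7; decide
  by_cases h8 : k = "tags"
  · subst h8; decide
  by_cases h9 : k = "retries"
  · subst h9; decide
  by_cases h10 : k = "priority"
  · subst h10; decide
  by_cases h11 : k = "disabled"
  · subst h11; decide
  by_cases h12 : k = "lang"
  · subst h12; decide
  simp [pvRk_eq, h1, h2, h3, h4, h5, h6, h7, h8, h9, h10, h11, h12]

lemma pvRk_iff_10 (k : String) : pvRk k = 10 ↔ k = "disabled" := by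
  by_cases h1 : k = "id"
  · subst h1; decide
  by_cases h2 : k = "type"
  · subst h2; decide
  by_cases h3 : k = "name"
  · subst h3; decide
  by_cases h4 : k = "deps"
  · subst h4; decide
  by_cases h5 : k = "timeout"
  · subst h5; decide
  by_cases h6 : k = "memory_mb"
  · subst h6; decide
  by_cases h7 : k = "sidefx"
  · subst h7; decide
  by_cases h8 : k = "tags"
  · subst h8; decide
  by_cases h9 : k = "retries"
  · subst h9; decide
  by_cases h10 : k = "priority"
  · subst h10; decide
  by_cases h11 : k = "disabled"
  · subst h11; decide
  by_cases h12 : k = "lang"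
  · subst h12; decide
  simp [pvRk_eq, h1, h2, h3, h4, h5, h6, h7, h8, h9, h10, h11, h12]

lemma pvRk_iff_11 (k : String) : pvRk k = 11 ↔ k = "lang" := by
  by_cases h1 : k = "id"
  · subst h1; decide
  by_cases h2 : k = "type"
  · subst h2; decide
  by_cases h3 : k = "name"
  · subst h3; decide
  by_cases h4 : k = "deps"
  · subst h4; decide
  by_cases h5 : k = "timeout"
  · subst h5; decide
  by_cases h6 : k = "memory_mb"
  · subst h6; decide
  by_cases h7 : k = "sidefx"
  · subst h7; decide
  by_cases h8 : k = "tags"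
  · subst h8; decide
  by_cases h9 : k = "retries"
  · subst h9; decide
  by_cases h10 : k = "priority"
  · subst h10; decide
  by_cases h11 : k = "disabled"
  · subst h11; decide
  by_cases h12 : k = "lang"
  · subst h12; decide
  simp [pvRk_eq, h1, h2, h3, h4, h5, h6, h7, h8, h9, h10, h11, h12]

lemma pvRk_iff_12 (k : String) : pvRk k = 12 ↔ k ∉ pvCanonKeyOrder := by
  by_cases h1 : k = "id"
  · subst h1; decide
  by_cases h2 : k = "type"
  · subst h2; decide
  by_cases h3 : k = "name"
  · subst h3; decide
  by_cases h4 : k = "deps"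
  · subst h4; decide
  by_cases h5 : k = "timeout"
  · subst h5; decide
  by_cases h6 : k = "memory_mb"
  · subst h6; decide
  by_cases h7 : k = "sidefx"
  · subst h7; decide
  by_cases h8 : k = "tags"
  · subst h8; decide
  by_cases h9 : k = "retries"
  · subst h9; decide
  by_cases h10 : k = "priority"
  · subst h10; decide
  by_cases h11 : k = "disabled"
  · subst h11; decide
  by_cases h12 : k = "lang"
  · subst h12; decide
  simp [pvRk_eq, pvCanonKeyOrder, h1, h2, h3, h4, h5, h6, h7, h8, h9, h10, h11, h12]

lemma pvRk_mem_range (k : String) :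
    pvRk k ∈ ([0, 1, 2, 3, 4, 5, 6, 7, 8, 9, 10, 11, 12] : List Int) := by
  by_cases h1 : k = "id"
  · subst h1; decide
  by_cases h2 : k = "type"
  · subst h2; decide
  by_cases h3 : k = "name"
  · subst h3; decide
  by_cases h4 : k = "deps"
  · subst h4; decide
  by_cases h5 : k = "timeout"
  · subst h5; decide
  by_cases h6 : k = "memory_mb"
  · subst h6; decide
  by_cases h7 : k = "sidefx"
  · subst h7; decide
  by_cases h8 : k = "tags"
  · subst h8; decide
  by_cases h9 : k = "retries"
  · subst h9; decide
  by_cases h10 : k = "priority"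
  · subst h10; decide
  by_cases h11 : k = "disabled"
  · subst h11; decide
  by_cases h12 : k = "lang"
  · subst h12; decide
  simp [pvRk_eq, h1, h2, h3, h4, h5, h6, h7, h8, h9, h10, h11, h12]

-- insertBy passes over a prefix it does not go before
lemma insertBy_append_left {α : Type} (before : α → α → Bool) (x : α) (l1 l2 : List α)
    (h : ∀ y ∈ l1, before x y = false) :
    PySem.List.insertBy before x (l1 ++ l2) = l1 ++ PySem.List.insertBy before x l2 := by
  induction l1 with
  | nil => rfl
  | cons a t ih =>
    rw [List.cons_append,
      show PySem.List.insertBy before x (a :: (t ++ l2))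
          = if before x a then x :: a :: (t ++ l2)
            else a :: PySem.List.insertBy before x (t ++ l2) from rfl]
    simp [h a (by simp), ih (fun y hy => h y (by simp [hy]))]

-- insertBy puts x in front when it goes before everything
lemma insertBy_cons_of_forall {α : Type} (before : α → α → Bool) (x : α) (ys : List α)
    (h : ∀ y ∈ ys, before x y = true) :
    PySem.List.insertBy before x ys = x :: ys := by
  cases ys with
  | nil => rfl
  | cons a t =>
    rw [show PySem.List.insertBy before x (a :: t)
        = if before x a then x :: a :: t else a :: PySem.List.insertBy before x t from rfl]
    simp [h a (by simp)]

-- a stable sort by an Int key is the concatenation of the rank buckets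
lemma sorted_buckets {α : Type} (key : α → Int) (xs : List α) (rs : List Int)
    (hrs : rs.Pairwise (· < ·)) (hall : ∀ x ∈ xs, key x ∈ rs) :
    PySem.List.sorted xs key false
      = rs.flatMap (fun r => xs.filter (fun x => key x = r)) := by
  rw [PySem.List.sorted_eq_foldl_insertBy]
  induction xs using List.reverseRecOn with
  | nil => simp
  | append_singleton ys x ih =>
    rw [List.foldl_append, List.foldl_cons, List.foldl_nil,
      ih (fun z hz => hall z (by simp [hz]))]
    have hx : key x ∈ rs := hall x (by simp)
    obtain ⟨rs1, rs2, hsplit⟩ := List.append_of_mem hx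
    subst hsplit
    have hp := List.pairwise_append.mp hrs
    have hlt1 : ∀ r ∈ rs1, r < key x := fun r hr => hp.2.2 r hr (key x) (by simp)
    have hlt2 : ∀ r ∈ rs2, key x < r := fun r hr => (List.pairwise_cons.mp hp.2.1).1 r hr
    simp only [List.flatMap_append, List.flatMap_cons]
    rw [insertBy_append_left]
    · rw [insertBy_append_left]
      · rw [insertBy_cons_of_forall]
        · have e1 : rs1.flatMap (fun r => ((ys ++ [x]).filter (fun z => decide (key z = r))))
              = rs1.flatMap (fun r => (ys.filter (fun z => decide (key z = r)))) := by
            refine List.flatMap_congr (fun r hr => ?_)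
            rw [List.filter_append]
            simp [ne_of_gt (hlt1 r hr)]
          have e2 : rs2.flatMap (fun r => ((ys ++ [x]).filter (fun z => decide (key z = r))))
              = rs2.flatMap (fun r => (ys.filter (fun z => decide (key z = r)))) := by
            refine List.flatMap_congr (fun r hr => ?_)
            rw [List.filter_append]
            simp [ne_of_lt (hlt2 r hr)]
          have e3 : (ys ++ [x]).filter (fun z => decide (key z = key x))
              = ys.filter (fun z => decide (key z = key x)) ++ [x] := by
            rw [List.filter_append]; simp
          rw [e1, e2, e3]
          simp
        · intro y hy
          simp only [List.mem_flatMap, List.mem_filter] at hy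
          obtain ⟨r, hr, _, hky⟩ := hy
          simp only [decide_eq_true_eq] at hky
          simp [hky, hlt2 r hr]
      · intro y hy
        simp only [List.mem_filter, decide_eq_true_eq] at hy
        simp [hy.2]
    · intro y hy
      simp only [List.mem_flatMap, List.mem_filter, decide_eq_true_eq] at hy
      obtain ⟨r, hr, _, hky⟩ := hy
      simp [hky, not_lt.mpr (le_of_lt (hlt1 r hr))]

-- A's first pass, characterised: emitted pairs and the 'seen' set
lemma pvCanonPass_fst (d : PySem.Dict String String) (ks : List String)
    (acc : List (String × String) × PySem.Set String) :
    (pvCanonPass d acc ks).1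
      = acc.1 ++ ks.flatMap (fun k => ((PySem.Dict.get? d k).map (fun v => (k, v))).toList) := by
  induction ks generalizing acc with
  | nil => simp [pvCanonPass]
  | cons a t ih =>
    simp only [pvCanonPass, List.foldl_cons] at *
    cases h : PySem.Dict.get? d a <;> simp [h, ih, List.flatMap_cons]

lemma pvCanonPass_mem_snd (d : PySem.Dict String String) (ks : List String)
    (acc : List (String × String) × PySem.Set String) (k' : String) :
    k' ∈ (pvCanonPass d acc ks).2
      ↔ k' ∈ acc.2 ∨ (k' ∈ ks ∧ (PySem.Dict.get? d k').isSome) := by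
  induction ks generalizing acc with
  | nil => simp [pvCanonPass]
  | cons a t ih =>
    simp only [pvCanonPass, List.foldl_cons] at *
    cases h : PySem.Dict.get? d a with
    | none =>
      rw [ih]
      constructor
      · rintro (h1 | ⟨h1, h2⟩)
        · exact Or.inl h1
        · exact Or.inr ⟨by simp [h1], h2⟩
      · rintro (h1 | ⟨h1, h2⟩)
        · exact Or.inl h1
        · rcases List.mem_cons.mp h1 with rfl | h1
          · simp [h] at h2
          · exact Or.inr ⟨h1, h2⟩
    | some v =>
      rw [ih]
      simp only [PySem.Set.mem_add]
      constructor
      · rintro (⟨h1 | rfl⟩ | ⟨h1, h2⟩)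
        · exact Or.inl h1
        · exact Or.inr ⟨by simp, by simp [h]⟩
        · exact Or.inr ⟨by simp [h1], h2⟩
      · rintro (h1 | ⟨h1, h2⟩)
        · exact Or.inl (Or.inl h1)
        · rcases List.mem_cons.mp h1 with rfl | h1
          · exact Or.inl (Or.inr rfl)
          · exact Or.inr ⟨h1, h2⟩

-- with distinct keys, the filter-by-key bucket is exactly the dict lookup
lemma filter_key_eq_lookup (tokens : List (String × String)) (k : String)
    (hnd : (tokens.map Prod.fst).Nodup) :
    tokens.filter (fun kv => kv.1 = k)
      = ((PySem.Dict.get? ⟨tokens⟩ k).map (fun v => (k, v))).toList := by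
  induction tokens with
  | nil => simp [PySem.Dict.get?]
  | cons a t ih =>
    simp only [List.map_cons, List.nodup_cons] at hnd
    by_cases h : a.1 = k
    · subst h
      have : t.filter (fun kv => kv.1 = a.1) = [] := by
        rw [List.filter_eq_nil_iff]
        intro kv hkv
        simp only [decide_eq_true_eq]
        exact fun he => hnd.1 (he ▸ List.mem_map_of_mem hkv)
      simp [PySem.Dict.get?, List.find?, this]
    · rw [List.filter_cons_of_neg (by simp [h]), ih hnd.2]
      simp only [PySem.Dict.get?, List.find?]
      rw [show (a.1 == k) = false from beq_eq_false_iff_ne.mpr h]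

-- ===== VERDICT (by name: the statement is the Claim_ definition above) =====
theorem iter_tokens_canonical_py_spec : Claim_equal_iter_tokens_canonical_py := by
  intro tokens _ hpre
  unfold Spec_iter_tokens_canonical_py iter_tokens_canonical_py iter_tokens_canonical_py_alt
  -- B's side: stable sort = rank buckets 0..12
  rw [show (fun kv : String × String => PySem.Dict.getD pvIndex kv.1 (pvCanonKeyOrder.length : Int))
      = (fun kv : String × String => pvRk kv.1) from rfl,
    sorted_buckets (fun kv : String × String => pvRk kv.1) tokens
      ([0, 1, 2, 3, 4, 5, 6, 7, 8, 9, 10, 11, 12] : List Int)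
      (by simp) (fun kv _ => pvRk_mem_range kv.1)]
  -- A's side: the two passes
  show (pvCanonPass ⟨tokens⟩ ([], PySem.Set.ofList []) pvCanonKeyOrder).1
      ++ tokens.foldl (fun acc kv =>
          if !(pvCanonPass ⟨tokens⟩ ([], PySem.Set.ofList []) pvCanonKeyOrder).2.contains kv.1
          then acc ++ [kv] else acc) [] = _
  rw [pvCanonPass_fst,
    PySem.List.foldl_append_if (fun kv : String × String =>
      !(pvCanonPass ⟨tokens⟩ ([], PySem.Set.ofList []) pvCanonKeyOrder).2.contains kv.1)
      (fun kv => kv) tokens []]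
  -- the second pass keeps exactly the non-canonical keys = rank-12 bucket
  have hsec : tokens.filter (fun kv =>
        !(pvCanonPass ⟨tokens⟩ ([], PySem.Set.ofList []) pvCanonKeyOrder).2.contains kv.1)
      = tokens.filter (fun kv => pvRk kv.1 = 12) := by
    refine List.filter_congr (fun kv hkv => ?_)
    have hsome : (PySem.Dict.get? ⟨tokens⟩ kv.1).isSome := by
      simp only [PySem.Dict.get?, Option.isSome_map]
      exact List.find?_isSome.mpr ⟨kv, hkv, by simp⟩
    have hmem : kv.1 ∈ (pvCanonPass ⟨tokens⟩ ([], PySem.Set.ofList []) pvCanonKeyOrder).2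
        ↔ kv.1 ∈ pvCanonKeyOrder := by
      rw [pvCanonPass_mem_snd]
      simp [hsome]
    rw [show PySem.Set.ofList ([] : List String) = [] from rfl] at hmem
    by_cases hc : kv.1 ∈ pvCanonKeyOrder
    · simp [pvRk_iff_12, hc]
      exact hmem.mpr hc
    · simp [pvRk_iff_12, hc]
      exact fun hx => hc (hmem.mp hx)
  rw [hsec]
  -- the first pass emits the canonical buckets in rank order
  have hbucket : ∀ (r : Int) (s : String), (∀ k, pvRk k = r ↔ k = s) →
      tokens.filter (fun kv => pvRk kv.1 = r)
        = ((PySem.Dict.get? ⟨tokens⟩ s).map (fun v => (s, v))).toList := by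
    intro r s hiff
    rw [← filter_key_eq_lookup tokens s hpre]
    exact List.filter_congr (fun kv _ => by simp [hiff])
  simp only [List.flatMap_cons, List.flatMap_nil, pvCanonKeyOrder, List.nil_append,
    hbucket 0 "id" pvRk_iff_0, hbucket 1 "type" pvRk_iff_1, hbucket 2 "name" pvRk_iff_2,
    hbucket 3 "deps" pvRk_iff_3, hbucket 4 "timeout" pvRk_iff_4,
    hbucket 5 "memory_mb" pvRk_iff_5, hbucket 6 "sidefx" pvRk_iff_6,
    hbucket 7 "tags" pvRk_iff_7, hbucket 8 "retries" pvRk_iff_8,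
    hbucket 9 "priority" pvRk_iff_9, hbucket 10 "disabled" pvRk_iff_10,
    hbucket 11 "lang" pvRk_iff_11]
  simp [List.append_assoc]
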